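-- pv_equiv track=rewrite | github.com/dfilimonv/Shuffle | Shuffle.py | normalized_part
-- ===== SOURCE A (Python) =====
-- import itertools
-- import copy
--
-- def normalized_part(part):
--     parts = copy.deepcopy(part)
--     keys = sorted(list(itertools.chain.from_iterable(parts)))
--     vals = range(len(keys))
--     d = dict(zip(keys,vals))
--     for p in parts:
--         for i in range(len(p)):
--             p[i] = d[p[i]]
--     return parts
-- ===== SOURCE B (Python) =====
-- import itertools
--
-- def normalized_part(part):
--     flat = list(itertools.chain.from_iterable(part))
--     return [[sum(1 for y in flat if y <= x) - 1 for x in p] for p in part]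
-- ===== Notes on version B (the rewrite author's own statement) =====
-- stated objective: simpler
-- what changed: Replaces sort + dict-of-ranks + in-place relabelling of a deep copy with a fresh nested comprehension that computes each element's rank directly as count(y <= x) - 1 over the flattened list.
import Mathlib
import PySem

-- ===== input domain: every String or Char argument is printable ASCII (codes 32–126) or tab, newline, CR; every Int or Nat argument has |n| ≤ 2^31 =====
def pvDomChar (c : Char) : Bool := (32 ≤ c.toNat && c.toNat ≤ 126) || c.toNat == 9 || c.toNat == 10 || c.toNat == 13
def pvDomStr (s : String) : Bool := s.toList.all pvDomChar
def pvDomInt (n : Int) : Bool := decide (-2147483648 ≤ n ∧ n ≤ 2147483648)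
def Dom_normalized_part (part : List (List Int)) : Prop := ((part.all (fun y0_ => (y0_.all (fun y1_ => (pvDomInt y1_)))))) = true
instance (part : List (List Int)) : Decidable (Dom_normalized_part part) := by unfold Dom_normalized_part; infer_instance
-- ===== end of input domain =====

-- B replaces sort + rank dictionary + in-place relabelling of a deep copy by a fresh
-- nested comprehension computing each element's rank as count(y <= x) - 1 (objective: simpler).

-- ===== PORT A =====
-- keys = sorted(flatten(parts)); d = dict(zip(keys, range(len(keys)))); relabel every element.
-- d[p[i]] always succeeds in Python (every element occurs among keys), so the getD default 0 is unreachable.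
def normalized_part (part : List (List Int)) : List (List Int) :=
  let parts := part
  let keys := PySem.List.sorted parts.flatten (fun x => x) false
  let vals := PySem.List.pyRange 0 (keys.length : Int) 1
  let d : PySem.Dict Int Int :=
    (keys.zip vals).foldl (fun d kv => d.insert kv.1 kv.2) PySem.Dict.empty
  parts.map (fun p => p.map (fun x => d.getD x 0))

-- ===== PORT B =====
def normalized_part_alt (part : List (List Int)) : List (List Int) :=
  let flat := part.flatten
  part.map (fun p => p.map (fun x => (flat.countP (fun y => decide (y ≤ x)) : Int) - 1))

-- ===== PRECONDITION & SPEC =====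
def Spec_normalized_part (part : List (List Int)) (out : List (List Int)) : Prop := out = normalized_part_alt part
instance (part : List (List Int)) (out : List (List Int)) : Decidable (Spec_normalized_part part out) := by unfold Spec_normalized_part; infer_instance

-- ===== CLAIM (what is proved, stated in full; the proofs are below) =====
def Claim_equal_normalized_part : Prop := ∀ (part : List (List Int)), Dom_normalized_part part → Spec_normalized_part part (normalized_part part)

-- ===== LEMMAS AND PROOFS =====

-- A's dict maps each key of a sorted list (indices starting at v0) to its LAST index there,
-- i.e. v0 + (number of elements ≤ it) - 1; keys absent from the list keep their d0 binding.
lemma fold_insert_rank (s : List Int) (v0 : Int) (d0 : PySem.Dict Int Int) (x : Int)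
    (hs : s.Pairwise (· ≤ ·)) :
    ((s.zip (PySem.List.pyRange v0 (v0 + s.length) 1)).foldl
        (fun d kv => d.insert kv.1 kv.2) d0).getD x 0 =
      if x ∈ s then v0 + (s.countP (fun y => decide (y ≤ x)) : Int) - 1 else d0.getD x 0 := by
  induction s generalizing v0 d0 with
  | nil => simp
  | cons a t ih =>
    have hcons : PySem.List.pyRange v0 (v0 + (a :: t).length) 1
        = v0 :: PySem.List.pyRange (v0 + 1) ((v0 + 1) + t.length) 1 := by
      rw [PySem.List.pyRange_one_cons (by simp only [List.length_cons]; push_cast; omega)]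
      congr 2
      simp only [List.length_cons]; push_cast; omega
    rw [hcons]
    simp only [List.zip_cons_cons, List.foldl_cons]
    rw [ih (v0 + 1) (d0.insert a v0) (hs.sublist (List.sublist_cons_self a t))]
    have hat : ∀ y ∈ t, a ≤ y := fun y hy => (List.pairwise_cons.mp hs).1 y hy
    by_cases hxt : x ∈ t
    · have hax : a ≤ x := hat x hxt
      simp [hxt, hax]
      omega
    · by_cases hxa : x = a
      · subst hxa
        have hcz : t.countP (fun y => decide (y ≤ x)) = 0 := by
          rw [List.countP_eq_zero]
          intro y hy
          have h1 := hat y hy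
          have h2 : y ≠ x := fun h => hxt (h ▸ hy)
          simp
          omega
        simp [hxt, hcz, PySem.Dict.getD_insert_self]
      · have hxm : x ∉ a :: t := by simp [hxa, hxt]
        simp only [hxt, if_false, hxm, if_false]
        rw [PySem.Dict.getD_insert_of_ne _ _ _ hxa]

-- ===== VERDICT (by name: the statement is the Claim_ definition above) =====
theorem normalized_part_spec : Claim_equal_normalized_part := by
  intro part _
  unfold Spec_normalized_part normalized_part normalized_part_alt
  simp only
  apply List.map_congr_left
  intro p hp
  apply List.map_congr_left
  intro x hx
  have hxf : x ∈ part.flatten := List.mem_flatten.mpr ⟨p, hp, hx⟩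
  set keys := PySem.List.sorted part.flatten (fun x => x) false with hk
  have hperm : keys.Perm part.flatten := PySem.List.sorted_perm _ _ _
  have hxk : x ∈ keys := hperm.mem_iff.mpr hxf
  have hsorted : keys.Pairwise (· ≤ ·) := PySem.List.sorted_pairwise _ _
  have hrange : (keys.length : Int) = 0 + (keys.length : Int) := by omega
  rw [hrange, fold_insert_rank keys 0 PySem.Dict.empty x hsorted]
  rw [if_pos hxk, hperm.countP_eq]
  omega
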